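-- pv_equiv track=rewrite | github.com/tiagospp55/FP | aula08/interests.py | common_interests
-- ===== SOURCE A (Python) =====
-- def common_interests(interests):
--     common_dict = {}
--     people = list(interests.keys())
--     for i in range(len(people)):
--         for j in range(i + 1, len(people)):
--             person1 = people[i]
--             person2 = people[j]
--             common = interests[person1] & interests[person2]
--             common_dict[(person1, person2)] = common
--     return common_dict
-- ===== SOURCE B (Python) =====
-- def common_interests(interests):
--     people = list(interests)
--     index = {p: i for i, p in enumerate(people)}
--     result = {}
--     for i in range(len(people)):
--         for j in range(i + 1, len(people)):
--             result[(people[i], people[j])] = set()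
--     holders = {}
--     for person, ints in interests.items():
--         for x in ints:
--             holders.setdefault(x, []).append(person)
--     for p in people:
--         for x in interests[p]:
--             for q in holders[x]:
--                 if index[q] > index[p]:
--                     result[(p, q)].add(x)
--     return result
-- ===== Notes on version B (the rewrite author's own statement) =====
-- stated objective: alternative
-- what changed: B replaces A's per-pair set intersections by an inverted index (interest -> holders in insertion order) plus a position dict: it pre-populates every i<j pair with an empty set and fills the sets by scanning each person's interests through the index.
import Mathlib
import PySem

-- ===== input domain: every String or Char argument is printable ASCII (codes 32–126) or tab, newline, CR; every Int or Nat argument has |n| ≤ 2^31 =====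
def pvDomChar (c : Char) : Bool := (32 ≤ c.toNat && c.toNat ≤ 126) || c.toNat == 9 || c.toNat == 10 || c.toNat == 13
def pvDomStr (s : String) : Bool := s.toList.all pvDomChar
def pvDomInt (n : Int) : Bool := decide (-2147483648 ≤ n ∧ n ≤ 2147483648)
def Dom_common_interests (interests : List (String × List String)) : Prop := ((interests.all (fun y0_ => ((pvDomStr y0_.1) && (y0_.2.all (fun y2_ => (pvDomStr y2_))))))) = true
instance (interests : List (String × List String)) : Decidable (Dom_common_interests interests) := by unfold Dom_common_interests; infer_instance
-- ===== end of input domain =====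

-- B replaces the quadratic per-pair set intersections by an inverted index (interest -> holders in
-- insertion order) and fills the pairwise sets from it; objective: alternative decomposition.

-- ===== PORT A =====
-- shared input decoding: the Python argument is a dict[str, set[str]]; as a Lean association list
-- it is decoded once into a PySem.Dict with set-valued (deduplicated) values.
def pvDecode (interests : List (String × List String)) : PySem.Dict String (List String) :=
  PySem.Dict.ofList (interests.map (fun kv => (kv.1, PySem.Set.ofList kv.2)))

def common_interests (interests : List (String × List String)) : List (String × String × List String) :=
  let d := pvDecode interests
  let people := d.keys
  let common_dict :=
    (PySem.List.pyRange 0 (people.length : Int) 1).foldl (fun cd i =>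
      (PySem.List.pyRange (i + 1) (people.length : Int) 1).foldl (fun cd j =>
        let person1 := PySem.List.pyGetD people i ""
        let person2 := PySem.List.pyGetD people j ""
        cd.insert (person1, person2)
          (PySem.Set.inter (d.getD person1 []) (d.getD person2 []))) cd)
      (PySem.Dict.empty : PySem.Dict (String × String) (List String))
  common_dict.items.map (fun it => (it.1.1, it.1.2, it.2))

-- ===== PORT B =====
def common_interests_alt (interests : List (String × List String)) : List (String × String × List String) :=
  let d := pvDecode interests
  let people := d.keys
  -- index = {p: i for i, p in enumerate(people)}
  let index := (PySem.List.enumerate people 0).foldl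
      (fun idx ip => idx.insert ip.2 ip.1) (PySem.Dict.empty : PySem.Dict String Int)
  -- result[(people[i], people[j])] = set()  for all i < j
  let result0 :=
    (PySem.List.pyRange 0 (people.length : Int) 1).foldl (fun r i =>
      (PySem.List.pyRange (i + 1) (people.length : Int) 1).foldl (fun r j =>
        r.insert (PySem.List.pyGetD people i "", PySem.List.pyGetD people j "")
          PySem.Set.empty) r)
      (PySem.Dict.empty : PySem.Dict (String × String) (List String))
  -- holders.setdefault(x, []).append(person)  (exact: h[x] = h.get(x, []) + [person])
  let holders := d.items.foldl (fun h pr =>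
      pr.2.foldl (fun h x => h.modify x [] (fun g => g ++ [pr.1])) h)
      (PySem.Dict.empty : PySem.Dict String (List String))
  -- result[(p, q)].add(x); ported as modify with default [] — exact, because the guard
  -- index[q] > index[p] guarantees the key (p, q) is present in result
  let result := people.foldl (fun r p =>
      (d.getD p []).foldl (fun r x =>
        (holders.getD x []).foldl (fun r q =>
          if index.getD q (-1) > index.getD p (-1)
          then r.modify (p, q) [] (fun s => PySem.Set.add s x) else r) r) r) result0
  result.items.map (fun it => (it.1.1, it.1.2, it.2))

-- ===== PRECONDITION & SPEC =====
def Spec_common_interests (interests : List (String × List String)) (out : List (String × String × List String)) : Prop := out = common_interests_alt interests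
instance (interests : List (String × List String)) (out : List (String × String × List String)) : Decidable (Spec_common_interests interests out) := by unfold Spec_common_interests; infer_instance

-- ===== CLAIM (what is proved, stated in full; the proofs are below) =====
def Claim_equal_common_interests : Prop := ∀ (interests : List (String × List String)), Dom_common_interests interests → Spec_common_interests interests (common_interests interests)

-- ===== LEMMAS AND PROOFS =====

-- ordered pairs (l[i], l[j]) with i < j, in A's (lexicographic index) order
def pvPairs : List String → List (String × String)
  | [] => []
  | p :: rest => rest.map (fun q => (p, q)) ++ pvPairs rest

theorem pv_mem_pvPairs_of_lt (l : List String) (a b : Nat) (hab : a < b) (hb : b < l.length) :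
    (l[a]'(lt_trans hab hb), l[b]) ∈ pvPairs l := by
  induction l generalizing a b with
  | nil => simp at hb
  | cons p rest ih =>
    cases a with
    | zero =>
      cases b with
      | zero => omega
      | succ b =>
        have hb' : b < rest.length := by simpa using hb
        simp only [pvPairs, List.mem_append, List.mem_map, List.getElem_cons_zero,
          List.getElem_cons_succ]
        exact Or.inl ⟨rest[b], List.getElem_mem _, rfl⟩
    | succ a =>
      cases b with
      | zero => omega
      | succ b =>
        simp only [pvPairs, List.mem_append, List.getElem_cons_succ]
        exact Or.inr (ih a b (by omega) (by simpa using hb))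

theorem pv_pvPairs_mem_elim (l : List String) (pq : String × String) (h : pq ∈ pvPairs l) :
    ∃ (a b : Nat) (ha : a < l.length) (hb : b < l.length),
      a < b ∧ pq.1 = l[a] ∧ pq.2 = l[b] := by
  induction l with
  | nil => simp [pvPairs] at h
  | cons p rest ih =>
    simp only [pvPairs, List.mem_append, List.mem_map] at h
    rcases h with ⟨q, hq, rfl⟩ | h
    · rcases List.mem_iff_getElem.mp hq with ⟨b, hb, rfl⟩
      exact ⟨0, b + 1, by simp, by simpa using Nat.succ_lt_succ hb, by omega, rfl, rfl⟩
    · rcases ih h with ⟨a, b, ha, hb, hab, h1, h2⟩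
      exact ⟨a + 1, b + 1, by simpa using Nat.succ_lt_succ ha,
        by simpa using Nat.succ_lt_succ hb, by omega, by simpa using h1, by simpa using h2⟩

theorem pv_nodup_pvPairs (l : List String) (h : l.Nodup) : (pvPairs l).Nodup := by
  induction l with
  | nil => simp [pvPairs]
  | cons p rest ih =>
    simp only [List.nodup_cons] at h
    simp only [pvPairs]
    have hinj : Function.Injective (fun q => ((p, q) : String × String)) := by
      intro a b hh; simpa using hh
    refine List.Nodup.append (h.2.map hinj) (ih h.2) ?_
    intro pq hpq1 hpq2
    rcases List.mem_map.mp hpq1 with ⟨q, hq, rfl⟩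
    rcases pv_pvPairs_mem_elim rest (p, q) hpq2 with ⟨a, b, ha, hb, hab, h1, h2⟩
    apply h.1
    have : p = rest[a] := h1
    exact this ▸ List.getElem_mem ha

-- ----- generic Dict facts -----
theorem pv_contains_iff_mem_keys {κ ν : Type} [BEq κ] [LawfulBEq κ]
    (d : PySem.Dict κ ν) (k : κ) : d.contains k = true ↔ k ∈ d.keys := by
  simp [PySem.Dict.contains, PySem.Dict.keys, List.any_eq_true, List.mem_map]

theorem pv_items_insert_of_not_contains {κ ν : Type} [BEq κ]
    (d : PySem.Dict κ ν) (k : κ) (v : ν) (h : d.contains k = false) :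
    (d.insert k v).items = d.items ++ [(k, v)] := by
  simp [PySem.Dict.insert, h]

theorem pv_getD_insert_self {κ ν : Type} [BEq κ] [LawfulBEq κ]
    (d : PySem.Dict κ ν) (k : κ) (v dflt : ν) : (d.insert k v).getD k dflt = v := by
  simp [PySem.Dict.getD, PySem.Dict.get?_insert_self]

theorem pv_getD_insert_of_ne {κ ν : Type} [BEq κ] [LawfulBEq κ]
    (d : PySem.Dict κ ν) (k k' : κ) (v dflt : ν) (h : k' ≠ k) :
    (d.insert k v).getD k' dflt = d.getD k' dflt := by
  simp [PySem.Dict.getD, PySem.Dict.get?_insert_of_ne d v h]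

-- fresh distinct keys: foldl insert appends
theorem pv_foldl_insert_fresh {κ ν : Type} [BEq κ] [LawfulBEq κ]
    (kvs : List (κ × ν)) (d : PySem.Dict κ ν)
    (hnd : (kvs.map Prod.fst).Nodup) (hfresh : ∀ k ∈ kvs.map Prod.fst, d.contains k = false) :
    (kvs.foldl (fun d kv => d.insert kv.1 kv.2) d).items = d.items ++ kvs := by
  induction kvs generalizing d with
  | nil => simp
  | cons kv kvs ih =>
    simp only [List.map_cons, List.nodup_cons] at hnd
    have hk : d.contains kv.1 = false := hfresh kv.1 (by simp)
    have hitems : (d.insert kv.1 kv.2).items = d.items ++ [kv] := by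
      rw [pv_items_insert_of_not_contains d kv.1 kv.2 hk]
    have hfresh' : ∀ k ∈ kvs.map Prod.fst, (d.insert kv.1 kv.2).contains k = false := by
      intro k hkmem
      have hne : ¬ (kv.1 == k) = true := by
        simp only [beq_iff_eq]
        rintro rfl; exact hnd.1 hkmem
      have : d.contains k = false := hfresh k (by simp [hkmem])
      simp only [PySem.Dict.contains, hitems, List.any_append, List.any_cons, List.any_nil,
        Bool.or_eq_false_iff] at this ⊢
      simp [this, hne]
    rw [List.foldl_cons, ih (d.insert kv.1 kv.2) hnd.2 hfresh', hitems]
    simp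

-- assoc-list find with nodup keys
theorem pv_find_of_mem {κ ν : Type} [BEq κ] [LawfulBEq κ]
    (l : List (κ × ν)) (hnd : (l.map Prod.fst).Nodup) (kv : κ × ν) (hm : kv ∈ l) :
    l.find? (fun p => p.1 == kv.1) = some kv := by
  induction l with
  | nil => simp at hm
  | cons h0 l ih =>
    simp only [List.map_cons, List.nodup_cons] at hnd
    rcases List.mem_cons.mp hm with rfl | hm
    · rw [List.find?_cons_of_pos (by simp)]
    · have hne : ¬ (h0.1 == kv.1) = true := by
        simp only [beq_iff_eq]
        intro he
        exact hnd.1 (he ▸ List.mem_map_of_mem hm)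
      exact (List.find?_cons_of_neg (p := fun p => p.1 == kv.1) (a := h0) (l := l)
        hne).trans (ih hnd.2 hm)

theorem pv_getD_of_mem_items {κ ν : Type} [BEq κ] [LawfulBEq κ]
    (d : PySem.Dict κ ν) (hnd : d.keys.Nodup) (kv : κ × ν) (hm : kv ∈ d.items) (dflt : ν) :
    d.getD kv.1 dflt = kv.2 := by
  simp [PySem.Dict.getD, PySem.Dict.get?,
    pv_find_of_mem d.items hnd kv hm]

theorem pv_items_modify_of_contains {κ ν : Type} [BEq κ] [LawfulBEq κ]
    (r : PySem.Dict κ ν) (k : κ) (dflt : ν) (f : ν → ν)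
    (hnd : r.keys.Nodup) (h : r.contains k = true) :
    (r.modify k dflt f).items = r.items.map (fun kv => if kv.1 == k then (k, f kv.2) else kv) := by
  simp only [PySem.Dict.modify, PySem.Dict.insert, h, if_pos]
  apply List.map_congr_left
  intro kv hkv
  by_cases hk : (kv.1 == k) = true
  · have hkeq : kv.1 = k := by simpa using hk
    have hg := pv_getD_of_mem_items r hnd kv hkv dflt
    simp only [hk, if_pos]
    rw [← hkeq, hg]
  · simp [hk]

-- membership of ofList items in the source list
theorem pv_mem_items_update {κ ν : Type} [BEq κ]
    (l : List (κ × ν)) (d : PySem.Dict κ ν) (kv : κ × ν) (h : kv ∈ (d.update l).items) :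
    kv ∈ d.items ∨ kv ∈ l := by
  induction l generalizing d with
  | nil => exact Or.inl (by simpa [PySem.Dict.update] using h)
  | cons p l ih =>
    have h' : kv ∈ ((d.insert p.1 p.2).update l).items := h
    rcases ih (d.insert p.1 p.2) h' with hin | hin
    · by_cases hc : d.contains p.1 = true
      · rw [PySem.Dict.insert, if_pos hc] at hin
        rcases List.mem_map.mp hin with ⟨q, hq, rfl⟩
        by_cases hq1 : (q.1 == p.1) = true
        · simp only [hq1, if_pos]
          exact Or.inr (List.mem_cons_self)
        · rw [if_neg hq1]
          exact Or.inl hq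
      · rw [PySem.Dict.insert, if_neg hc] at hin
        rcases List.mem_append.mp hin with hold | hnew
        · exact Or.inl hold
        · simp only [List.mem_singleton] at hnew
          subst hnew
          exact Or.inr (List.mem_cons_self)
    · exact Or.inr (List.mem_cons_of_mem _ hin)

-- outer index loop from k = pvPairs of the k-suffix
theorem pv_double_loop_aux (people : List String) (g : String → String → List String)
    (k : Nat) (cd : PySem.Dict (String × String) (List String)) :
    ((PySem.List.pyRange (k : Int) (people.length : Int) 1).foldl (fun cd i =>
      (PySem.List.pyRange (i + 1) (people.length : Int) 1).foldl (fun cd j =>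
        cd.insert (PySem.List.pyGetD people i "", PySem.List.pyGetD people j "")
          (g (PySem.List.pyGetD people i "") (PySem.List.pyGetD people j ""))) cd) cd)
    = (pvPairs (people.drop k)).foldl (fun cd pq => cd.insert pq (g pq.1 pq.2)) cd := by
  rcases Nat.lt_or_ge k people.length with hk | hk
  · have hlt : (k : Int) < (people.length : Int) := by exact_mod_cast hk
    rw [PySem.List.pyRange_one_cons hlt, List.foldl_cons]
    have hget : PySem.List.pyGetD people (k : Int) "" = people[k] := by
      rw [PySem.List.pyGetD_eq_getElem people "" (by omega) (by exact_mod_cast hk)]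
      simp
    have hinner :
        ((PySem.List.pyRange ((k : Int) + 1) (people.length : Int) 1).foldl (fun cd j =>
          cd.insert (PySem.List.pyGetD people (k : Int) "", PySem.List.pyGetD people j "")
            (g (PySem.List.pyGetD people (k : Int) "") (PySem.List.pyGetD people j ""))) cd)
        = (people.drop (k + 1)).foldl
            (fun cd q => cd.insert (people[k], q) (g people[k] q)) cd := by
      rw [hget]
      have h2 := PySem.List.foldl_pyRange_pyGetD' people ""
        (fun cd q => cd.insert (people[k]'hk, q) (g (people[k]'hk) q)) cd
        (a := (k : Int) + 1) (by omega)
      simpa using h2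
    rw [hinner]
    have hrec := pv_double_loop_aux people g (k + 1)
      ((people.drop (k + 1)).foldl (fun cd q => cd.insert (people[k], q) (g people[k] q)) cd)
    rw [show ((k : Int) + 1) = ((k + 1 : Nat) : Int) by push_cast; ring, hrec]
    have hdrop : people.drop k = people[k] :: people.drop (k + 1) :=
      (List.getElem_cons_drop hk).symm
    rw [hdrop]
    simp only [pvPairs, List.foldl_append, List.foldl_map]
  · have h1 : PySem.List.pyRange (k : Int) (people.length : Int) 1 = [] :=
      PySem.List.pyRange_one_eq_nil (by exact_mod_cast hk)
    have h2 : people.drop k = [] := List.drop_of_length_le hk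
    rw [h1, h2]
    simp [pvPairs]
termination_by people.length - k

-- ----- the double index loop builds exactly the pvPairs association list -----
theorem pv_double_loop (people : List String) (g : String → String → List String)
    (hnd : people.Nodup) :
    ((PySem.List.pyRange 0 (people.length : Int) 1).foldl (fun cd i =>
      (PySem.List.pyRange (i + 1) (people.length : Int) 1).foldl (fun cd j =>
        cd.insert (PySem.List.pyGetD people i "", PySem.List.pyGetD people j "")
          (g (PySem.List.pyGetD people i "") (PySem.List.pyGetD people j ""))) cd)
      (PySem.Dict.empty : PySem.Dict (String × String) (List String))).items
    = (pvPairs people).map (fun pq => (pq, g pq.1 pq.2)) := by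
  have h0 := pv_double_loop_aux people g 0 PySem.Dict.empty
  rw [show (((0 : Nat) : Int)) = (0 : Int) by simp, List.drop_zero] at h0
  rw [h0]
  have hmap : (pvPairs people).foldl (fun cd pq => cd.insert pq (g pq.1 pq.2)) PySem.Dict.empty
      = ((pvPairs people).map (fun pq => (pq, g pq.1 pq.2))).foldl
          (fun cd kv => cd.insert kv.1 kv.2) PySem.Dict.empty := by
    rw [List.foldl_map]
  rw [hmap, pv_foldl_insert_fresh]
  · simp [PySem.Dict.empty]
  · simp only [List.map_map]
    have : ((fun kv => kv.1) ∘ fun pq => (pq, g pq.1 pq.2)) = (id : String × String → String × String) := by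
      funext pq; rfl
    rw [show (Prod.fst ∘ fun pq => (pq, g pq.1 pq.2)) = (id : String × String → String × String) by funext pq; rfl]
    simpa using pv_nodup_pvPairs people hnd
  · intro kk _
    rfl

-- ----- guarded modify fold over a dict: per-key value, keys unchanged -----
theorem pv_foldl_guarded_modify {O κ ν : Type} [BEq κ] [LawfulBEq κ]
    (ops : List O) (key : O → κ) (guard : O → Prop) [DecidablePred guard]
    (f : O → ν → ν) (dflt : ν) (r : PySem.Dict κ ν)
    (hnd : r.keys.Nodup) (h : ∀ o ∈ ops, guard o → r.contains (key o) = true) :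
    (ops.foldl (fun r o => if guard o then r.modify (key o) dflt (f o) else r) r).items
    = r.items.map (fun kv =>
        (kv.1, (ops.filter (fun o => decide (guard o) && (key o == kv.1))).foldl
          (fun v o => f o v) kv.2)) := by
  induction ops generalizing r with
  | nil => simp
  | cons o ops ih =>
    by_cases hg : guard o
    · have hc := h o List.mem_cons_self hg
      have hitems := pv_items_modify_of_contains r (key o) dflt (f o) hnd hc
      have hkeys : (r.modify (key o) dflt (f o)).keys = r.keys := by
        simp only [PySem.Dict.keys, hitems, List.map_map]
        apply List.map_congr_left
        intro kv _
        by_cases hk : (kv.1 == key o) = true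
        · simp [(beq_iff_eq.mp hk).symm]
        · simp [hk]
      have hnd' : (r.modify (key o) dflt (f o)).keys.Nodup := hkeys ▸ hnd
      have hcont : ∀ x, ((r.modify (key o) dflt (f o)).contains x) = r.contains x := by
        intro x
        have h1 := pv_contains_iff_mem_keys (r.modify (key o) dflt (f o)) x
        have h2 := pv_contains_iff_mem_keys r x
        rw [hkeys] at h1
        by_cases hm : x ∈ r.keys
        · rw [h1.mpr hm, h2.mpr hm]
        · cases hb1 : (r.modify (key o) dflt (f o)).contains x with
          | false =>
            cases hb2 : r.contains x with
            | false => rfl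
            | true => exact absurd (h2.mp hb2) hm
          | true => exact absurd (h1.mp hb1) hm
      simp only [List.foldl_cons, if_pos hg]
      rw [ih (r.modify (key o) dflt (f o)) hnd' (fun o' ho' hg' => by
        rw [hcont]; exact h o' (List.mem_cons_of_mem _ ho') hg')]
      rw [hitems, List.map_map]
      apply List.map_congr_left
      intro kv _
      by_cases hk : (kv.1 == key o) = true
      · have hkeq : kv.1 = key o := beq_iff_eq.mp hk
        simp only [Function.comp, hk, if_pos, List.filter_cons]
        have : (decide (guard o) && (key o == kv.1)) = true := by
          simp [hg, hkeq]
        simp [hkeq, hg]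
      · simp only [Function.comp, hk, List.filter_cons]
        have : (decide (guard o) && (key o == kv.1)) = false := by
          rcases hb : (key o == kv.1) with _ | _
          · simp
          · exact absurd (Eq.symm (by simpa [beq_iff_eq] using hb)) (by simpa [beq_iff_eq] using hk)
        simp [this]
    · simp only [List.foldl_cons, if_neg hg]
      rw [ih r hnd (fun o' ho' hg' => h o' (List.mem_cons_of_mem _ ho') hg')]
      apply List.map_congr_left
      intro kv _
      have : (decide (guard o) && (key o == kv.1)) = false := by simp [hg]
      simp [this]

theorem pv_getD_modify {κ ν : Type} [BEq κ] [LawfulBEq κ]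
    (d : PySem.Dict κ ν) (k x : κ) (dflt : ν) (f : ν → ν) :
    (d.modify k dflt f).getD x dflt
    = if (x == k) = true then f (d.getD k dflt) else d.getD x dflt := by
  by_cases hx : (x == k) = true
  · rw [if_pos hx]
    have hxe : x = k := beq_iff_eq.mp hx
    subst hxe
    simp [PySem.Dict.modify, PySem.Dict.getD, PySem.Dict.get?_insert_self]
  · rw [if_neg hx]
    simp only [PySem.Dict.modify]
    exact pv_getD_insert_of_ne d k x _ dflt (by simpa using hx)

-- ----- holders characterization -----
theorem pv_holders_inner (ints : List String) (p : String)
    (h : PySem.Dict String (List String)) (x : String) (hnd : ints.Nodup) :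
    ((ints.foldl (fun h x => h.modify x [] (fun g => g ++ [p])) h).getD x [])
    = h.getD x [] ++ (if x ∈ ints then [p] else []) := by
  induction ints generalizing h with
  | nil => simp
  | cons y ints ih =>
    simp only [List.nodup_cons] at hnd
    rw [List.foldl_cons, ih (h.modify y [] (fun g => g ++ [p])) hnd.2,
      pv_getD_modify h y x [] (fun g => g ++ [p])]
    by_cases hx : x = y
    · subst hx
      simp [hnd.1]
    · simp [beq_iff_eq, hx]

theorem pv_holders_outer (prs : List (String × List String))
    (h0 : PySem.Dict String (List String)) (x : String)
    (hvals : ∀ pr ∈ prs, pr.2.Nodup) :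
    ((prs.foldl (fun h pr => pr.2.foldl (fun h x => h.modify x [] (fun g => g ++ [pr.1])) h) h0).getD x [])
    = h0.getD x [] ++ (prs.filter (fun pr => pr.2.contains x)).map Prod.fst := by
  induction prs generalizing h0 with
  | nil => simp
  | cons pr prs ih =>
    rw [List.foldl_cons,
      ih (pr.2.foldl (fun h x => h.modify x [] (fun g => g ++ [pr.1])) h0)
        (fun q hq => hvals q (List.mem_cons_of_mem _ hq)),
      pv_holders_inner pr.2 pr.1 h0 x (hvals pr List.mem_cons_self),
      List.filter_cons]
    by_cases hx : x ∈ pr.2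
    · simp [hx]
    · simp [hx]

-- ----- index dict characterization -----
theorem pv_index_not_mem (l : List String) (s : Int) (h0 : PySem.Dict String Int)
    (x : String) (hx : x ∉ l) :
    ((PySem.List.enumerate l s).foldl (fun idx ip => idx.insert ip.2 ip.1) h0).getD x (-1)
    = h0.getD x (-1) := by
  induction l generalizing s h0 with
  | nil => simp [PySem.List.enumerate]
  | cons p l ih =>
    simp only [List.mem_cons, not_or] at hx
    rw [PySem.List.enumerate_cons, List.foldl_cons,
      ih (s + 1) (h0.insert p s) (fun hm => hx.2 hm),
      pv_getD_insert_of_ne h0 p x s (-1) hx.1]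

theorem pv_index_getD (l : List String) (s : Int) (h0 : PySem.Dict String Int)
    (hnd : l.Nodup) (a : Nat) (ha : a < l.length) :
    ((PySem.List.enumerate l s).foldl (fun idx ip => idx.insert ip.2 ip.1) h0).getD l[a] (-1)
    = s + (a : Int) := by
  induction l generalizing s h0 a with
  | nil => simp at ha
  | cons p l ih =>
    simp only [List.nodup_cons] at hnd
    rw [PySem.List.enumerate_cons, List.foldl_cons]
    cases a with
    | zero =>
      simp only [List.getElem_cons_zero]
      rw [pv_index_not_mem l (s + 1) (h0.insert p s) p hnd.1,
        pv_getD_insert_self]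
      simp
    | succ a =>
      simp only [List.getElem_cons_succ]
      rw [ih (s + 1) (h0.insert p s) hnd.2 a (by simpa using ha)]
      push_cast
      ring

-- ----- guarded Set.add fold = filter -----
theorem pv_foldl_guarded_add (l acc : List String) (pred : String → Bool)
    (hnd : l.Nodup) (hdisj : ∀ x ∈ l, x ∉ acc) :
    l.foldl (fun s x => if pred x then PySem.Set.add s x else s) acc = acc ++ l.filter pred := by
  induction l generalizing acc with
  | nil => simp
  | cons y l ih =>
    simp only [List.nodup_cons] at hnd
    rw [List.foldl_cons, List.filter_cons]
    by_cases hy : pred y = true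
    · rw [if_pos hy, if_pos hy, PySem.Set.add_of_not_mem (hdisj y List.mem_cons_self),
        ih (acc ++ [y]) hnd.2 ?_]
      · simp
      · intro x hxl
        simp only [List.mem_append, List.mem_singleton, not_or]
        exact ⟨hdisj x (List.mem_cons_of_mem _ hxl), fun he => hnd.1 (he ▸ hxl)⟩
    · rw [if_neg hy, if_neg hy, ih acc hnd.2 (fun x hxl => hdisj x (List.mem_cons_of_mem _ hxl))]

-- flatMap where only one element contributes
theorem pv_flatMap_single {α β : Type} (l : List α) (g : α → List β) (p0 : α)
    (hm : p0 ∈ l) (hnd : l.Nodup) (h : ∀ p ∈ l, p ≠ p0 → g p = []) :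
    l.flatMap g = g p0 := by
  induction l with
  | nil => simp at hm
  | cons a l ih =>
    simp only [List.nodup_cons] at hnd
    rw [List.flatMap_cons]
    by_cases ha : a = p0
    · subst ha
      have : l.flatMap g = [] := List.flatMap_eq_nil_iff.mpr
        (fun p hp => h p (List.mem_cons_of_mem _ hp) (fun he => hnd.1 (he ▸ hp)))
      simp [this]
    · rcases List.mem_cons.mp hm with rfl | hm'
      · exact absurd rfl ha
      · rw [h a List.mem_cons_self ha, List.nil_append]
        exact ih hm' hnd.2 (fun p hp => h p (List.mem_cons_of_mem _ hp))

-- filter of a nodup list by (equals c and G c)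
theorem pv_filter_single (l : List String) (c : String) (G : String → Bool) (hnd : l.Nodup) :
    l.filter (fun q => (q == c) && G q) = if c ∈ l ∧ G c = true then [c] else [] := by
  induction l with
  | nil => simp
  | cons a l ih =>
    simp only [List.nodup_cons] at hnd
    rw [List.filter_cons]
    by_cases ha : a = c
    · subst ha
      have htail : l.filter (fun q => (q == a) && G q) = [] := by
        apply List.filter_eq_nil_iff.mpr
        intro q hq
        have : ¬ (q == a) = true := by
          simp only [beq_iff_eq]
          intro he; exact hnd.1 (he ▸ hq)
        simp [this]
      by_cases hG : G a = true
      · simp [hG, htail]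
      · simp only [beq_self_eq_true, Bool.true_and, hG]
        rw [htail, if_neg (by simp)]
        simp
    · have : ((a == c) && G a) = false := by simp [ha]
      rw [this, ih hnd.2]
      simp only [Bool.false_eq_true, if_false]
      by_cases hc : c ∈ l ∧ G c = true
      · rw [if_pos hc, if_pos ⟨List.mem_cons_of_mem _ hc.1, hc.2⟩]
      · rw [if_neg hc, if_neg (by
          rintro ⟨hm, hGc⟩
          rcases List.mem_cons.mp hm with rfl | hm'
          · exact ha rfl
          · exact hc ⟨hm', hGc⟩)]

-- per-input facts and assembly
theorem pv_getD_nodup (interests : List (String × List String)) (p : String) :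
    ((pvDecode interests).getD p []).Nodup := by
  have hitems : ∀ pr ∈ (pvDecode interests).items, pr.2.Nodup := by
    intro pr hpr
    rcases pv_mem_items_update _ _ pr hpr with h0 | h1
    · simp [PySem.Dict.empty] at h0
    · rcases List.mem_map.mp h1 with ⟨kv, _, rfl⟩
      exact PySem.Set.nodup_ofList kv.2
  cases hg : (pvDecode interests).get? p with
  | none => simp [PySem.Dict.getD, hg]
  | some v =>
    simp only [PySem.Dict.getD, hg, Option.getD_some]
    simp only [PySem.Dict.get?, Option.map_eq_some_iff] at hg
    rcases hg with ⟨pr, hfind, rfl⟩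
    exact hitems pr (List.mem_of_find?_eq_some hfind)

theorem pv_holders_getD (interests : List (String × List String)) (x : String) :
    (((pvDecode interests).items.foldl (fun h pr =>
        pr.2.foldl (fun h x => h.modify x [] (fun g => g ++ [pr.1])) h)
        (PySem.Dict.empty : PySem.Dict String (List String))).getD x [])
    = (pvDecode interests).keys.filter (fun q => ((pvDecode interests).getD q []).contains x) := by
  have hvals : ∀ pr ∈ (pvDecode interests).items, pr.2.Nodup := by
    intro pr hpr
    rcases pv_mem_items_update _ _ pr hpr with h0 | h1
    · simp [PySem.Dict.empty] at h0
    · rcases List.mem_map.mp h1 with ⟨kv, _, rfl⟩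
      exact PySem.Set.nodup_ofList kv.2
  rw [pv_holders_outer _ _ x hvals]
  have hempty : (PySem.Dict.empty : PySem.Dict String (List String)).getD x [] = [] := rfl
  rw [hempty, List.nil_append, PySem.Dict.keys, List.filter_map]
  congr 1
  apply List.filter_congr
  intro pr hpr
  have := pv_getD_of_mem_items (pvDecode interests) (PySem.Dict.nodup_keys_ofList _) pr hpr []
  simp only [Function.comp]
  rw [this]

-- the inverted-index filling loop computes the pairwise intersections
theorem pv_triple (people : List String) (val : String → List String)
    (holders : String → List String) (idx : String → Int)
    (r0 : PySem.Dict (String × String) (List String))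
    (hnd : people.Nodup)
    (hval : ∀ p, (val p).Nodup)
    (hholders : ∀ x, holders x = people.filter (fun q => (val q).contains x))
    (hidx : ∀ (a : Nat) (ha : a < people.length), idx people[a] = (a : Int))
    (hr0 : r0.items = (pvPairs people).map (fun pq => (pq, ([] : List String)))) :
    (people.foldl (fun r p =>
        (val p).foldl (fun r x =>
          (holders x).foldl (fun r q =>
            if idx q > idx p then r.modify (p, q) [] (fun s => PySem.Set.add s x) else r) r) r) r0).items
    = (pvPairs people).map (fun pq => (pq, PySem.Set.inter (val pq.1) (val pq.2))) := by
  have hkeys : r0.keys = pvPairs people := by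
    rw [PySem.Dict.keys, hr0, List.map_map]
    have hcomp : ((fun x => x.1) ∘ fun pq : String × String => (pq, ([] : List String)))
        = id := rfl
    rw [hcomp, List.map_id]
  have hknd : r0.keys.Nodup := by rw [hkeys]; exact pv_nodup_pvPairs people hnd
  have hfold :
      (people.flatMap (fun p => (val p).flatMap (fun x =>
          (holders x).map (fun q => (p, x, q))))).foldl
        (fun r o => if idx o.2.2 > idx o.1
          then r.modify (o.1, o.2.2) [] (fun s => PySem.Set.add s o.2.1) else r) r0
      = people.foldl (fun r p =>
          (val p).foldl (fun r x =>
            (holders x).foldl (fun r q =>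
              if idx q > idx p then r.modify (p, q) [] (fun s => PySem.Set.add s x) else r) r) r) r0 := by
    simp only [List.foldl_flatMap, List.foldl_map]
  rw [← hfold]
  have hcont : ∀ o ∈ (people.flatMap (fun p => (val p).flatMap (fun x =>
      (holders x).map (fun q => (p, x, q))))), (idx o.2.2 > idx o.1) →
      r0.contains (o.1, o.2.2) = true := by
    intro o ho hg
    rcases List.mem_flatMap.mp ho with ⟨p, hp, ho2⟩
    rcases List.mem_flatMap.mp ho2 with ⟨x, hx, ho3⟩
    rcases List.mem_map.mp ho3 with ⟨q, hq, rfl⟩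
    have hqp : q ∈ people := by
      rw [hholders x] at hq
      exact (List.mem_filter.mp hq).1
    rcases List.mem_iff_getElem.mp hp with ⟨a, ha, rfl⟩
    rcases List.mem_iff_getElem.mp hqp with ⟨b, hb, rfl⟩
    simp only [hidx a ha, hidx b hb] at hg
    have hab : a < b := by exact_mod_cast hg
    exact (pv_contains_iff_mem_keys r0 _).mpr
      (hkeys ▸ pv_mem_pvPairs_of_lt people a b hab hb)
  have hmod := pv_foldl_guarded_modify
    (people.flatMap (fun p => (val p).flatMap (fun x => (holders x).map (fun q => (p, x, q)))))
    (fun o => (o.1, o.2.2)) (fun o => idx o.2.2 > idx o.1)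
    (fun o s => PySem.Set.add s o.2.1) [] r0 hknd hcont
  beta_reduce at hmod
  rw [hmod, hr0, List.map_map]
  apply List.map_congr_left
  intro pq hpq
  obtain ⟨a, b, ha, hb, hab, h1, h2⟩ := pv_pvPairs_mem_elim people pq hpq
  simp only [Function.comp]
  refine congrArg (fun v => (pq, v)) ?_
  -- push the filter inside the nested flatMaps
  simp only [List.filter_flatMap, List.filter_map]
  have hmem1 : pq.1 ∈ people := h1 ▸ List.getElem_mem ha
  have hmem2 : pq.2 ∈ people := h2 ▸ List.getElem_mem hb
  rw [pv_flatMap_single people _ pq.1 hmem1 hnd (by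
    intro p hp hne
    apply List.flatMap_eq_nil_iff.mpr
    intro x hx
    rw [List.map_eq_nil_iff]
    apply List.filter_eq_nil_iff.mpr
    intro q hq
    simp only [Function.comp]
    simp [beq_iff_eq, Prod.ext_iff, hne])]
  have hinner : ∀ x, ((holders x).filter
        ((fun o => decide (idx o.2.2 > idx o.1) && ((o.1, o.2.2) == pq)) ∘ (fun q => (pq.1, x, q)))).map
        (fun q => (pq.1, x, q))
      = if (val pq.2).contains x = true then [(pq.1, x, pq.2)] else [] := by
    intro x
    have hpred : ((fun o => decide (idx o.2.2 > idx o.1) && ((o.1, o.2.2) == pq)) ∘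
          (fun q : String => (pq.1, x, q)))
        = (fun q => (q == pq.2) && decide (idx q > idx pq.1)) := by
      funext q
      simp only [Function.comp]
      rw [Bool.and_comm]
      congr 1
      apply Bool.eq_iff_iff.mpr
      simp [beq_iff_eq, Prod.ext_iff]
    rw [hpred, hholders x, pv_filter_single _ pq.2 _ (hnd.filter _)]
    have hgd : decide (idx pq.2 > idx pq.1) = true := by
      rw [h1, h2, hidx a ha, hidx b hb]
      simp only [decide_eq_true_eq, gt_iff_lt]
      exact_mod_cast hab
    by_cases hcx : (val pq.2).contains x = true
    · rw [if_pos ⟨List.mem_filter.mpr ⟨hmem2, hcx⟩, hgd⟩, if_pos hcx]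
      rfl
    · rw [if_neg (by
        rintro ⟨hmf, -⟩
        exact hcx (List.mem_filter.mp hmf).2), if_neg hcx]
      rfl
  rw [funext hinner]
  rw [List.foldl_flatMap]
  have hstep : (fun (v : List String) (x : String) =>
        List.foldl (fun v o => PySem.Set.add v o.2.1) v
          (if (val pq.2).contains x = true then [(pq.1, x, pq.2)] else []))
      = (fun v x => if (val pq.2).contains x = true then PySem.Set.add v x else v) := by
    funext v x
    by_cases hcx : (val pq.2).contains x = true
    · rw [if_pos hcx, if_pos hcx]
      rfl
    · rw [if_neg hcx, if_neg hcx]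
      rfl
  rw [hstep, pv_foldl_guarded_add (val pq.1) [] (fun x => (val pq.2).contains x) (hval _)
    (by simp)]
  rfl

-- ===== VERDICT (by name: the statement is the Claim_ definition above) =====
theorem common_interests_spec : Claim_equal_common_interests := by
  intro interests _hdom
  unfold Spec_common_interests
  simp only [common_interests, common_interests_alt]
  have hnd : (pvDecode interests).keys.Nodup := PySem.Dict.nodup_keys_ofList _
  have hA := pv_double_loop (pvDecode interests).keys
    (fun a b => PySem.Set.inter ((pvDecode interests).getD a []) ((pvDecode interests).getD b []))
    hnd
  beta_reduce at hA
  rw [hA]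
  have hB0 := pv_double_loop (pvDecode interests).keys
    (fun _ _ => (PySem.Set.empty : PySem.Set String)) hnd
  beta_reduce at hB0
  have hT := pv_triple (pvDecode interests).keys
    (fun p => (pvDecode interests).getD p [])
    (fun x => (((pvDecode interests).items.foldl (fun h pr =>
        pr.2.foldl (fun h x => h.modify x [] (fun g => g ++ [pr.1])) h)
        (PySem.Dict.empty : PySem.Dict String (List String))).getD x []))
    (fun q => (((PySem.List.enumerate (pvDecode interests).keys).foldl
        (fun idx ip => idx.insert ip.2 ip.1)
        (PySem.Dict.empty : PySem.Dict String Int)).getD q (-1)))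
    ((PySem.List.pyRange 0 ((pvDecode interests).keys.length : Int) 1).foldl (fun r i =>
      (PySem.List.pyRange (i + 1) ((pvDecode interests).keys.length : Int) 1).foldl (fun r j =>
        r.insert (PySem.List.pyGetD (pvDecode interests).keys i "",
          PySem.List.pyGetD (pvDecode interests).keys j "") PySem.Set.empty) r)
      (PySem.Dict.empty : PySem.Dict (String × String) (List String)))
    hnd
    (fun p => pv_getD_nodup interests p)
    (fun x => pv_holders_getD interests x)
    (fun a ha => by
      simpa using pv_index_getD (pvDecode interests).keys 0 PySem.Dict.empty hnd a ha)
    hB0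
  beta_reduce at hT
  rw [hT]
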